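-- pv_equiv track=rewrite | github.com/tanmlh/Self-supervised-Domain-agnostic-Domain-Adaptation-for-Satellite-Images | datasets/inria2sn2_dataset.py | get_city
-- ===== SOURCE A (Python) =====
-- def get_city(data, idx):
--     lens = [len(data[x]) for x in data.keys()]
--     sum_len = 0
--     for i, x in enumerate(lens):
--         if idx < sum_len + x:
--             return list(data.keys())[i], idx - sum_len
--         sum_len += x
--
--     raise ValueError('Invalid index')
-- ===== SOURCE B (Python) =====
-- def get_city(data, idx):
--     keys = list(data.keys())
--     cum = []
--     total = 0
--     for k in keys:
--         total += len(data[k])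
--         cum.append(total)
--     # binary search for the first i with idx < cum[i] (bisect_right by hand)
--     lo, hi = 0, len(cum)
--     while lo < hi:
--         mid = (lo + hi) // 2
--         if idx < cum[mid]:
--             hi = mid
--         else:
--             lo = mid + 1
--     if lo == len(cum):
--         raise ValueError('Invalid index')
--     prev = cum[lo - 1] if lo > 0 else 0
--     return keys[lo], idx - prev
-- ===== Notes on version B (the rewrite author's own statement) =====
-- stated objective: alternative
-- what changed: Replaces A's linear cumulative scan (which rebuilds list(data.keys()) at the hit) by a one-pass prefix-sum build followed by a binary search for the first cumulative sum exceeding idx.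
import Mathlib
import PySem

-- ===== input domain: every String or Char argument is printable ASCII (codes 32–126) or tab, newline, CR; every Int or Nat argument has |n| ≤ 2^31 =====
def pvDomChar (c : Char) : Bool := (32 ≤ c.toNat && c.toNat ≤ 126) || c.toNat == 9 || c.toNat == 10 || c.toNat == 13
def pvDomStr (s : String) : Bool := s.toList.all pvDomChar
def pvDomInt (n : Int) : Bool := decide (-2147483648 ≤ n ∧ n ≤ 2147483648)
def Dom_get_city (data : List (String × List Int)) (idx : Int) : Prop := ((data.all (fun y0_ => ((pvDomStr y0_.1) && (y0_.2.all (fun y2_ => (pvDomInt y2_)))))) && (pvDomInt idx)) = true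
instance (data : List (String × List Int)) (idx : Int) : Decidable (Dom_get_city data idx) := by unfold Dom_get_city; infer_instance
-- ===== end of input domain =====

-- B replaces A's linear cumulative scan (with list(data.keys())[i] rebuilt at the hit)
-- by a one-pass prefix-sum build plus a hand-written binary search over the prefix sums.


-- ===== PORT A =====
-- A's for-loop over enumerate(lens) with running sum_len; returns the key at the hit index.
-- Python's `raise ValueError` becomes `none`; Pre_get_city excludes exactly those inputs.
def pyGetCityLoop (pairs : List (String × Int)) (sumLen idx : Int) : Option (String × Int) :=
  match pairs with
  | [] => none
  | (k, x) :: rest =>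
    if idx < sumLen + x then some (k, idx - sumLen)
    else pyGetCityLoop rest (sumLen + x) idx

def get_city (data : List (String × List Int)) (idx : Int) : String × Int :=
  (pyGetCityLoop (data.map fun p => (p.1, (p.2.length : Int))) 0 idx).getD ("", 0)

-- ===== PORT B =====
-- running-total prefix sums (Source B's cum list, built with `total += len(data[k])`)
def accumList (s : Int) : List Int → List Int
  | [] => []
  | x :: xs => (s + x) :: accumList (s + x) xs

-- Source B's hand-written bisect_right loop (while lo < hi …)
def bisectRight (cum : List Int) (x : Int) (lo hi : Nat) : Nat :=
  if lo < hi then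
    if x < cum.getD ((lo + hi) / 2) 0 then bisectRight cum x lo ((lo + hi) / 2)
    else bisectRight cum x ((lo + hi) / 2 + 1) hi
  else lo
termination_by hi - lo
decreasing_by all_goals omega

def get_city_alt (data : List (String × List Int)) (idx : Int) : String × Int :=
  let keys := data.map Prod.fst
  let cum := accumList 0 (data.map fun p => ((p.2.length : Int)))
  let lo := bisectRight cum idx 0 cum.length
  if lo = cum.length then ("", 0)   -- Source B raises ValueError here; excluded by Pre_get_city
  else (keys.getD lo "", idx - (if lo = 0 then 0 else cum.getD (lo - 1) 0))

-- ===== PRECONDITION & SPEC =====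
-- Pre_ excludes exactly the inputs on which A raises ValueError:
-- empty data, or idx ≥ the total number of items.
def Pre_get_city (data : List (String × List Int)) (idx : Int) : Prop :=
  data ≠ [] ∧ idx < (data.map fun p => ((p.2.length : Int))).sum
instance (data : List (String × List Int)) (idx : Int) : Decidable (Pre_get_city data idx) := by
  unfold Pre_get_city; infer_instance
def pvWitness_get_city : (List (String × List Int)) × Int := ([("a", [1, 2]), ("b", [3])], 2)

def Spec_get_city (data : List (String × List Int)) (idx : Int) (out : String × Int) : Prop := out = get_city_alt data idx
instance (data : List (String × List Int)) (idx : Int) (out : String × Int) : Decidable (Spec_get_city data idx out) := by unfold Spec_get_city; infer_instance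

-- ===== CLAIM (what is proved, stated in full; the proofs are below) =====
def Claim_equal_get_city : Prop := ∀ (data : List (String × List Int)) (idx : Int), Dom_get_city data idx → Pre_get_city data idx → Spec_get_city data idx (get_city data idx)

-- ===== LEMMAS AND PROOFS =====

theorem accumList_length (s : Int) (l : List Int) : (accumList s l).length = l.length := by
  induction l generalizing s with
  | nil => rfl
  | cons x xs ih => simp [accumList, ih]

theorem accumList_getD (s : Int) (l : List Int) (i : Nat) (hi : i < l.length) :
    (accumList s l).getD i 0 = s + (l.take (i + 1)).sum := by
  induction l generalizing s i with
  | nil => simp at hi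
  | cons x xs ih =>
    cases i with
    | zero => simp [accumList]
    | succ m =>
      simp only [accumList, List.getD_cons_succ, List.take_succ_cons, List.sum_cons]
      rw [ih (s + x) m (by simpa using hi)]
      ring

theorem sum_take_mono (l : List Int) (hl : ∀ x ∈ l, 0 ≤ x) {i j : Nat} (hij : i ≤ j) :
    (l.take i).sum ≤ (l.take j).sum := by
  have h : l.take j = l.take i ++ (l.drop i).take (j - i) := by
    rw [← List.take_add]
    congr 1
    omega
  rw [h, List.sum_append]
  have : 0 ≤ ((l.drop i).take (j - i)).sum := by
    apply List.sum_nonneg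
    intro x hx
    exact hl x (List.mem_of_mem_drop (List.mem_of_mem_take hx))
  omega

theorem accum_mono (s : Int) (l : List Int) (hl : ∀ x ∈ l, 0 ≤ x) {i j : Nat}
    (hij : i ≤ j) (hj : j < l.length) :
    (accumList s l).getD i 0 ≤ (accumList s l).getD j 0 := by
  rw [accumList_getD s l i (by omega), accumList_getD s l j hj]
  have := sum_take_mono l hl (by omega : i + 1 ≤ j + 1)
  omega

-- the "first index with idx < cum[i]" property
def FirstIdx (cum : List Int) (idx : Int) (n : Nat) : Prop :=
  n ≤ cum.length ∧ (∀ j < n, cum.getD j 0 ≤ idx) ∧ (n < cum.length → idx < cum.getD n 0)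

theorem bisectRight_firstIdx (cum : List Int) (idx : Int)
    (mono : ∀ i j : Nat, i ≤ j → j < cum.length → cum.getD i 0 ≤ cum.getD j 0) :
    ∀ fuel lo hi : Nat, hi - lo ≤ fuel → lo ≤ hi → hi ≤ cum.length →
    (∀ j < lo, cum.getD j 0 ≤ idx) →
    (∀ j, hi ≤ j → j < cum.length → idx < cum.getD j 0) →
    FirstIdx cum idx (bisectRight cum idx lo hi) := by
  intro fuel
  induction fuel with
  | zero =>
    intro lo hi hf hle hhi hlo hup
    have : lo = hi := by omega
    subst this
    rw [bisectRight]
    simp only [lt_irrefl, if_false]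
    exact ⟨by omega, hlo, fun h => hup lo (le_refl _) h⟩
  | succ f ih =>
    intro lo hi hf hle hhi hlo hup
    rw [bisectRight]
    by_cases h : lo < hi
    · simp only [h, if_true]
      by_cases hc : idx < cum.getD ((lo + hi) / 2) 0
      · simp only [hc, if_true]
        apply ih lo ((lo + hi) / 2) (by omega) (by omega) (by omega) hlo
        intro j hj hjl
        exact lt_of_lt_of_le hc (mono _ _ hj hjl)
      · simp only [hc, if_false]
        apply ih ((lo + hi) / 2 + 1) hi (by omega) (by omega) hhi
        · intro j hj
          rcases Nat.lt_or_ge j lo with hjl | hjl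
          · exact hlo j hjl
          · have : cum.getD j 0 ≤ cum.getD ((lo + hi) / 2) 0 :=
              mono j ((lo + hi) / 2) (by omega) (by omega)
            omega
        · exact hup
    · simp only [h, if_false]
      have : lo = hi := by omega
      subst this
      exact ⟨by omega, hlo, fun hlt => hup lo (le_refl _) hlt⟩

-- A's loop, evaluated at any index n having the first-index property
theorem loop_spec (lens : List Int) :
    ∀ (keys : List String) (s idx : Int) (n : Nat), keys.length = lens.length →
    n ≤ lens.length →
    (∀ j < n, (accumList s lens).getD j 0 ≤ idx) →
    (n < lens.length → idx < (accumList s lens).getD n 0) →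
    pyGetCityLoop (keys.zip lens) s idx =
      if n < lens.length then
        some (keys.getD n "",
          idx - (if n = 0 then s else (accumList s lens).getD (n - 1) 0))
      else none := by
  induction lens with
  | nil =>
    intro keys s idx n hk hn _ _
    have : n = 0 := by simpa using hn
    subst this
    simp [pyGetCityLoop]
  | cons x xs ih =>
    intro keys s idx n hk hn hbelow hat
    cases keys with
    | nil => simp at hk
    | cons k ks =>
      simp only [List.zip_cons_cons, pyGetCityLoop]
      cases n with
      | zero =>
        have hx : idx < s + x := by
          have := hat (by simp)
          simpa [accumList] using this
        simp [hx]
      | succ m =>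
        have hsx : s + x ≤ idx := by
          have := hbelow 0 (Nat.succ_pos m)
          simpa [accumList] using this
        have hcond : ¬ idx < s + x := by omega
        simp only [hcond, if_false]
        rw [ih ks (s + x) idx m (by simpa using hk) (by simpa using hn)
            (fun j hj => by
              have := hbelow (j + 1) (by omega)
              simpa [accumList] using this)
            (fun hm => by
              have := hat (by simpa using Nat.succ_lt_succ hm)
              simpa [accumList] using this)]
        by_cases hm : m < xs.length
        · simp only [hm, if_true, List.length_cons, if_pos (by omega : m + 1 < xs.length + 1)]
          cases m with
          | zero => simp [accumList]
          | succ p => simp [accumList]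
        · simp only [hm, if_false, List.length_cons, if_neg (by omega : ¬ m + 1 < xs.length + 1)]

theorem zip_map_eq (data : List (String × List Int)) :
    data.map (fun p => (p.1, (p.2.length : Int))) =
      (data.map Prod.fst).zip (data.map fun p => ((p.2.length : Int))) := by
  induction data with
  | nil => rfl
  | cons a l ih => simp [ih]

-- ===== VERDICT (by name: the statement is the Claim_ definition above) =====
theorem get_city_spec : Claim_equal_get_city := by
  intro data idx _ hpre
  obtain ⟨hne, hidx⟩ := hpre
  unfold Spec_get_city get_city get_city_alt
  set lens := data.map fun p => ((p.2.length : Int)) with hlens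
  set keys := data.map Prod.fst with hkeys
  set cum := accumList 0 lens with hcum
  have hnonneg : ∀ x ∈ lens, 0 ≤ x := by
    intro x hx
    rw [hlens] at hx
    obtain ⟨p, _, rfl⟩ := List.mem_map.mp hx
    positivity
  have hmono : ∀ i j : Nat, i ≤ j → j < cum.length → cum.getD i 0 ≤ cum.getD j 0 := by
    intro i j hij hj
    exact accum_mono 0 lens hnonneg hij (by rwa [hcum, accumList_length] at hj)
  have hcl : cum.length = lens.length := accumList_length 0 lens
  have hkl : keys.length = lens.length := by simp [hkeys, hlens]
  have hlpos : 0 < lens.length := by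
    rw [hlens]; simpa using List.length_pos_of_ne_nil hne
  set r := bisectRight cum idx 0 cum.length with hr
  have hfirst : FirstIdx cum idx r :=
    bisectRight_firstIdx cum idx hmono (cum.length) 0 cum.length (by omega) (by omega)
      (le_refl _) (by omega) (by intro j hj hjl; omega)
  obtain ⟨hr1, hr2, hr3⟩ := hfirst
  have hrlt : r < lens.length := by
    by_contra hge
    have hre : r = lens.length := by omega
    have := hr2 (lens.length - 1) (by omega)
    rw [accumList_getD 0 lens (lens.length - 1) (by omega)] at this
    have htake : lens.take (lens.length - 1 + 1) = lens := by
      apply List.take_of_length_le; omega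
    rw [htake] at this
    omega
  rw [zip_map_eq data, ← hlens, ← hkeys]
  rw [loop_spec lens keys 0 idx r hkl (by omega)
      (fun j hj => hr2 j hj) (fun _ => hr3 (by omega))]
  simp only [hrlt, if_true]
  have hrne : ¬ r = cum.length := by omega
  rw [← hr]
  simp only [Option.getD_some, if_neg hrne]
  by_cases h0 : r = 0 <;> simp [h0, hcum]
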